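-- pv_equiv track=rewrite | github.com/WolfgangFahl/pyThunderbird | thunderbird/mail.py | toSbdFolder
-- ===== SOURCE A (Python) =====
-- def toSbdFolder(folderURI):
--     """
--     get the SBD folder for the given folderURI as a tuple
--
--     Args:
--         folderURI(str): the folder uri
--     Returns:
--         sbdFolder(str): the prefix
--         folder(str): the local path
--     """
--     folder = folderURI.replace("mailbox://nobody@", "")
--     # https://stackoverflow.com/a/14007559/1497139
--     parts = folder.split("/")
--     sbdFolder = "/Mail/"
--     folder = ""
--     for i, part in enumerate(parts):
--         if i == 0:  # e.g. "Local Folders" ...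
--             sbdFolder += f"{part}/"
--         elif i < len(parts) - 1:
--             sbdFolder += f"{part}.sbd/"
--             folder += f"{part}/"
--         else:
--             sbdFolder += f"{part}"
--             folder += f"{part}"
--     return sbdFolder, folder
-- ===== SOURCE B (Python) =====
-- def toSbdFolder(folderURI):
--     """
--     get the SBD folder for the given folderURI as a tuple
--
--     Args:
--         folderURI(str): the folder uri
--     Returns:
--         sbdFolder(str): the prefix
--         folder(str): the local path
--     """
--     body = folderURI.replace("mailbox://nobody@", "")
--     head, _sep, folder = body.partition("/")
--     sbdFolder = "/Mail/" + head + "/" + folder.replace("/", ".sbd/")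
--     return sbdFolder, folder
-- ===== Notes on version B (the rewrite author's own statement) =====
-- stated objective: simpler
-- what changed: Drops the split-into-parts list and the enumerate loop entirely: B partitions the URI body at the FIRST slash, returns the tail verbatim as the local path, and obtains the sbd prefix with a single global replace of '/' by '.sbd/' on that tail.
import Mathlib
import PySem

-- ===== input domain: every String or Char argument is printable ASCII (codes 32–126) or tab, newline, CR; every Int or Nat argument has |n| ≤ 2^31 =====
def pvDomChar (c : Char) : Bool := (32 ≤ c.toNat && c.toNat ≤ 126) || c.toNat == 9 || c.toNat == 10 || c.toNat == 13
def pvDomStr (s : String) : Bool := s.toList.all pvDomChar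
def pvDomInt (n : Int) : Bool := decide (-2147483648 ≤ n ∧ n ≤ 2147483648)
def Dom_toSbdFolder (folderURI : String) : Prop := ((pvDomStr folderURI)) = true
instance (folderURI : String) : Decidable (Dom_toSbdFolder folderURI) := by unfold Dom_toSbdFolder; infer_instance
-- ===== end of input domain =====

-- B drops A's split-into-parts list and enumerate loop: it partitions the body at the
-- first '/' and builds the prefix with one global replace of '/' by '.sbd/' on the tail
-- (simpler decomposition; same values).

-- ===== PORT A =====
-- the body of A's for-loop over enumerate(parts); n = len(parts)
def pvStepA (n : Nat) (st : List Char × List Char) (ip : Int × List Char) :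
    List Char × List Char :=
  if ip.1 == 0 then (st.1 ++ (ip.2 ++ ['/']), st.2)
  else if ip.1 < (n : Int) - 1 then
    (st.1 ++ (ip.2 ++ ".sbd/".toList), st.2 ++ (ip.2 ++ ['/']))
  else (st.1 ++ ip.2, st.2 ++ ip.2)

-- A on List Char (strings are ported through PySem.Chars, exact on the ASCII domain)
def toSbdFolderChars (uri : List Char) : List Char × List Char :=
  let folder := PySem.Chars.replace uri "mailbox://nobody@".toList []
  let parts := PySem.Chars.splitOn folder ['/']
  (PySem.List.enumerate parts).foldl (pvStepA parts.length) ("/Mail/".toList, [])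

def toSbdFolder (folderURI : String) : String × String :=
  let r := toSbdFolderChars folderURI.toList
  (String.ofList r.1, String.ofList r.2)

-- ===== PORT B =====
-- hand port of str.partition for a single-char separator (exact: scans to the FIRST
-- occurrence; none ↔ the separator is absent, i.e. Python's ('', '') middle/tail)
def pvPartition (c : Char) : List Char → Option (List Char × List Char)
  | [] => none
  | a :: t => if a = c then some ([], t)
              else (pvPartition c t).map (fun p => (a :: p.1, p.2))

-- B on List Char: body = uri.replace(prefix, ''); head, _, folder = body.partition('/');
-- sbdFolder = '/Mail/' + head + '/' + folder.replace('/', '.sbd/')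
def toSbdFolderAltChars (uri : List Char) : List Char × List Char :=
  let body := PySem.Chars.replace uri "mailbox://nobody@".toList []
  match pvPartition '/' body with
  | none => ("/Mail/".toList ++ body ++ ['/'], ([] : List Char))
  | some (head, folder) =>
      ("/Mail/".toList ++ head ++ ['/'] ++ PySem.Chars.replace folder ['/'] ".sbd/".toList,
       folder)

def toSbdFolder_alt (folderURI : String) : String × String :=
  let r := toSbdFolderAltChars folderURI.toList
  (String.ofList r.1, String.ofList r.2)

-- ===== PRECONDITION & SPEC =====
def Spec_toSbdFolder (folderURI : String) (out : String × String) : Prop := out = toSbdFolder_alt folderURI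
instance (folderURI : String) (out : String × String) : Decidable (Spec_toSbdFolder folderURI out) := by unfold Spec_toSbdFolder; infer_instance

-- ===== CLAIM =====
def Claim_equal_toSbdFolder : Prop := ∀ (folderURI : String), Dom_toSbdFolder folderURI → Spec_toSbdFolder folderURI (toSbdFolder folderURI)

-- ===== LEMMAS AND PROOFS =====

-- reference split on a single character (proof-side spec of Chars.splitOn [c])
def pvSplitc (c : Char) : List Char → List (List Char)
  | [] => [[]]
  | a :: t => if a = c then [] :: pvSplitc c t
              else match pvSplitc c t with
                   | h :: r => (a :: h) :: r
                   | [] => [[a]]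

-- reference replace of a single character (proof-side spec of Chars.replace [c] new)
def pvReplc (c : Char) (new : List Char) : List Char → List Char
  | [] => []
  | a :: t => if a = c then new ++ pvReplc c new t else a :: pvReplc c new t

theorem pvSplitc_ne_nil (c : Char) (l : List Char) : pvSplitc c l ≠ [] := by
  cases l with
  | nil => simp [pvSplitc]
  | cons a t =>
    rw [pvSplitc]
    split
    · simp
    · split <;> simp_all

theorem pvSplitOnGo_eq (c : Char) (l : List Char) : ∀ (fuel : Nat) (cur : List Char)
    (acc : List (List Char)), l.length ≤ fuel →
    PySem.Chars.splitOn.go [c] fuel l cur acc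
      = acc.reverse ++ (pvSplitc c l).modifyHead (cur.reverse ++ ·) := by
  induction l with
  | nil =>
    intro fuel cur acc _
    cases fuel <;> simp [PySem.Chars.splitOn.go, pvSplitc]
  | cons a t ih =>
    intro fuel cur acc hf
    cases fuel with
    | zero => simp at hf
    | succ f =>
      rw [PySem.Chars.splitOn.go]
      by_cases hac : a = c
      · have hpre : [c].isPrefixOf (a :: t) = true := by simp [List.isPrefixOf, hac]
        simp only [hpre, if_pos]
        have hd : List.drop [c].length (a :: t) = t := rfl
        rw [hd, ih f [] _ (by simpa using Nat.le_of_succ_le_succ hf)]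
        have : (pvSplitc c t).modifyHead (([] : List Char).reverse ++ ·) = pvSplitc c t := by
          cases pvSplitc c t <;> simp
        rw [this]
        simp [pvSplitc, hac]
      · have hpre : [c].isPrefixOf (a :: t) = false := by
          simp [List.isPrefixOf]
          exact fun h => absurd h.symm hac
        simp only [hpre, Bool.false_eq_true, if_false]
        rw [ih f (a :: cur) acc (by simpa using Nat.le_of_succ_le_succ hf)]
        obtain ⟨h, r, hr⟩ := List.exists_cons_of_ne_nil (pvSplitc_ne_nil c t)
        rw [pvSplitc]
        simp [hac, hr]

theorem pvSplitOn_eq (c : Char) (s : List Char) :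
    PySem.Chars.splitOn s [c] = pvSplitc c s := by
  rw [PySem.Chars.splitOn, pvSplitOnGo_eq c s (s.length + 1) [] [] (by omega)]
  cases pvSplitc c s <;> simp

theorem pvReplaceGo_eq (c : Char) (new : List Char) (l : List Char) :
    ∀ (fuel : Nat) (acc : List Char), l.length ≤ fuel →
    PySem.Chars.replace.go [c] new fuel l acc = acc.reverse ++ pvReplc c new l := by
  induction l with
  | nil =>
    intro fuel acc _
    cases fuel <;> simp [PySem.Chars.replace.go, pvReplc]
  | cons a t ih =>
    intro fuel acc hf
    cases fuel with
    | zero => simp at hf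
    | succ f =>
      rw [PySem.Chars.replace.go]
      by_cases hac : a = c
      · have hpre : [c].isPrefixOf (a :: t) = true := by simp [List.isPrefixOf, hac]
        simp only [hpre, if_pos]
        have hd : List.drop [c].length (a :: t) = t := rfl
        rw [hd, ih f _ (by simpa using Nat.le_of_succ_le_succ hf)]
        simp [pvReplc, hac]
      · have hpre : [c].isPrefixOf (a :: t) = false := by
          simp [List.isPrefixOf]
          exact fun h => absurd h.symm hac
        simp only [hpre, Bool.false_eq_true, if_false]
        rw [ih f (a :: acc) (by simpa using Nat.le_of_succ_le_succ hf)]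
        simp [pvReplc, hac]

theorem pvReplace_eq (c : Char) (new : List Char) (s : List Char) :
    PySem.Chars.replace s [c] new = pvReplc c new s := by
  rw [PySem.Chars.replace]
  simp only [List.isEmpty_cons, Bool.false_eq_true, if_false]
  exact pvReplaceGo_eq c new s s.length [] le_rfl

-- partition vs split: none → one piece; some (h, t) → head piece h, then the split of t
theorem pvPartition_splitc (c : Char) (l : List Char) :
    (pvPartition c l = none → pvSplitc c l = [l]) ∧
    (∀ h t, pvPartition c l = some (h, t) → pvSplitc c l = h :: pvSplitc c t) := by
  induction l with
  | nil => simp [pvPartition, pvSplitc]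
  | cons a rest ih =>
    by_cases hac : a = c
    · constructor
      · intro hnone; rw [pvPartition] at hnone; simp [hac] at hnone
      · intro h t hsome
        rw [pvPartition] at hsome
        simp only [hac, if_pos] at hsome
        obtain ⟨h1, h2⟩ : ([] : List Char) = h ∧ rest = t := by
          simpa using hsome
        subst h1; subst h2
        simp [pvSplitc, hac]
    · constructor
      · intro hnone
        rw [pvPartition] at hnone
        simp only [hac, if_false] at hnone
        have hnone' : pvPartition c rest = none := by
          cases hp : pvPartition c rest <;> simp [hp] at hnone ⊢
        rw [pvSplitc, ih.1 hnone']
        simp [hac]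
      · intro h t hsome
        rw [pvPartition] at hsome
        simp only [hac, if_false] at hsome
        cases hp : pvPartition c rest with
        | none => simp [hp] at hsome
        | some p =>
          simp only [hp, Option.map_some] at hsome
          obtain ⟨h1, h2⟩ : a :: p.1 = h ∧ p.2 = t := by simpa using hsome
          subst h1; subst h2
          rw [pvSplitc, ih.2 p.1 p.2 (by simp [hp])]
          simp [hac]

theorem pvJoin_nil_cons (x : List Char) (l : List (List Char)) :
    PySem.Chars.join [] (x :: l) = x ++ PySem.Chars.join [] l := by
  cases l with
  | nil => simp [PySem.Chars.join_singleton, PySem.Chars.join_nil]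
  | cons y l' => simp [PySem.Chars.join_cons_cons]

-- '/'.join of the split gives the string back
theorem pvJoin_splitc (c : Char) (t : List Char) :
    PySem.Chars.join [c] (pvSplitc c t) = t := by
  induction t with
  | nil => simp [pvSplitc, PySem.Chars.join_singleton]
  | cons a rest ih =>
    by_cases hac : a = c
    · rw [pvSplitc]
      simp only [hac, if_pos]
      obtain ⟨h, r, hr⟩ := List.exists_cons_of_ne_nil (pvSplitc_ne_nil c rest)
      rw [hr] at ih ⊢
      rw [PySem.Chars.join_cons_cons]
      simp [ih]
    · rw [pvSplitc]
      simp only [hac, if_false]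
      obtain ⟨h, r, hr⟩ := List.exists_cons_of_ne_nil (pvSplitc_ne_nil c rest)
      rw [hr] at ih ⊢
      cases r with
      | nil => simp_all [PySem.Chars.join_singleton]
      | cons r1 rs =>
        rw [PySem.Chars.join_cons_cons] at ih ⊢
        simp [← ih]

-- middle-with-separator spec: p1 ++ new ++ p2 ++ new ++ … ++ pk
def pvMid (new : List Char) : List (List Char) → List Char
  | [] => []
  | [p] => p
  | p :: ps => p ++ new ++ pvMid new ps

theorem pvMid_eq_join (new : List Char) (ps : List (List Char)) :
    PySem.Chars.join [] (ps.dropLast.map (fun p => p ++ new)) ++ ps.getLastD []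
      = pvMid new ps := by
  induction ps with
  | nil => simp [pvMid, PySem.Chars.join_nil]
  | cons p ps ih =>
    cases ps with
    | nil => simp [pvMid, PySem.Chars.join_nil]
    | cons p2 ps' =>
      rw [pvMid, List.dropLast_cons_of_ne_nil (by simp), List.map_cons, pvJoin_nil_cons]
      simp only [List.getLastD_cons] at ih ⊢
      rw [List.append_assoc, ih]
      simp

-- the '.sbd/'-middle of the split plus last piece equals the single global replace on t
theorem pvSbd_splitc (c : Char) (new : List Char) (t : List Char) :
    pvMid new (pvSplitc c t) = pvReplc c new t := by
  induction t with
  | nil => simp [pvSplitc, pvMid, pvReplc]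
  | cons a rest ih =>
    obtain ⟨h, r, hr⟩ := List.exists_cons_of_ne_nil (pvSplitc_ne_nil c rest)
    by_cases hac : a = c
    · rw [pvSplitc]
      simp only [hac, if_pos]
      rw [pvReplc]
      simp only [if_pos, ← ih, hr]
      cases r <;> simp [pvMid]
    · rw [pvSplitc]
      simp only [hac, if_false]
      rw [pvReplc]
      simp only [hac, if_false, ← ih, hr]
      cases r <;> simp [pvMid]

-- A's loop over the tail of parts (indices 1 … n-1) computes the middle/tail joins
theorem pvLoopTail (rest : List (List Char)) (i : Int) (n : Nat) (s f : List Char)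
    (h1 : 1 ≤ i) (h2 : i + rest.length = n) :
    (PySem.List.enumerate rest i).foldl (pvStepA n) (s, f)
      = (s ++ PySem.Chars.join [] (rest.dropLast.map (fun p => p ++ ".sbd/".toList))
          ++ rest.getLastD [],
         f ++ PySem.Chars.join ['/'] rest) := by
  induction rest generalizing i s f with
  | nil => simp [PySem.List.enumerate_nil, PySem.Chars.join_nil]
  | cons r rs ih =>
    rw [PySem.List.enumerate_cons]
    simp only [List.foldl_cons]
    have hne0 : (i == 0) = false := by simp; omega
    cases rs with
    | nil =>
      have hlast : ¬ (i < (n : Int) - 1) := by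
        simp only [List.length_cons, List.length_nil] at h2; push_cast at h2; omega
      simp [pvStepA, hne0, hlast, PySem.List.enumerate_nil,
        PySem.Chars.join_singleton, PySem.Chars.join_nil]
    | cons r' rs' =>
      have hmid : i < (n : Int) - 1 := by
        simp only [List.length_cons] at h2; push_cast at h2; omega
      rw [pvStepA]
      simp only [hne0, Bool.false_eq_true, if_false, hmid, if_pos]
      rw [ih (i + 1) _ _ (by omega)
        (by simp only [List.length_cons] at h2 ⊢; push_cast at h2 ⊢; omega)]
      simp [pvJoin_nil_cons, PySem.Chars.join_cons_cons,
        List.dropLast_cons_of_ne_nil, List.append_assoc]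

-- the two Chars-level programs agree
theorem pvChars_eq (uri : List Char) : toSbdFolderChars uri = toSbdFolderAltChars uri := by
  simp only [toSbdFolderChars, toSbdFolderAltChars]
  generalize PySem.Chars.replace uri "mailbox://nobody@".toList [] = body
  cases hp : pvPartition '/' body with
  | none =>
    have hs : PySem.Chars.splitOn body ['/'] = [body] := by
      rw [pvSplitOn_eq]; exact (pvPartition_splitc '/' body).1 hp
    rw [hs]
    rw [PySem.List.enumerate_cons]
    simp [pvStepA, PySem.List.enumerate_nil]
  | some ht =>
    obtain ⟨h, t⟩ := ht
    have hs : PySem.Chars.splitOn body ['/'] = h :: pvSplitc '/' t := by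
      rw [pvSplitOn_eq]; exact (pvPartition_splitc '/' body).2 h t hp
    rw [hs]
    rw [PySem.List.enumerate_cons]
    simp only [List.foldl_cons]
    have h0 : pvStepA (h :: pvSplitc '/' t).length ("/Mail/".toList, []) (0, h)
        = ("/Mail/".toList ++ (h ++ ['/']), []) := by
      simp [pvStepA]
    rw [h0, zero_add,
      pvLoopTail (pvSplitc '/' t) 1 (h :: pvSplitc '/' t).length _ _ (by omega)
        (by simp; omega)]
    rw [List.append_assoc, pvMid_eq_join, pvSbd_splitc, pvJoin_splitc, pvReplace_eq]
    simp [List.append_assoc]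

-- ===== VERDICT =====
theorem toSbdFolder_spec : Claim_equal_toSbdFolder := by
  intro folderURI _
  unfold Spec_toSbdFolder toSbdFolder toSbdFolder_alt
  rw [pvChars_eq]
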